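-- pv_equiv track=rewrite | github.com/darpanshukla/Smart-Component-Method-Py-implementation | SCM-COMPLETE-PY3-VERSION/generate_collapsed_model.py | generate_parallel_hierarchy
-- ===== SOURCE A (Python) =====
-- def has_n_in( id, links ):
-- 	'''
-- 	Returns number of input links coming to id
-- 	'''
-- 	linkin = 0
-- 	for l in links:
-- 		if int(l[2]) == id:
-- 			linkin += 1
-- 	return linkin;
--
-- def has_n_in_link( id, links ):
-- 	'''
-- 	Returns list of input links coming to id
-- 	'''
-- 	list_linkin = []
-- 	for l in links:
-- 		if int(l[2]) == id:
-- 			list_linkin.append(l)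
-- 	return list_linkin;
--
-- def generate_parallel_hierarchy( idlist1, series_connection, links ):
-- 	'''
-- 	inputs: [ series connection list ] and [ links ]
-- 	output: [ [list of incoming series connection], component ]
-- 	'''
-- 	parallel_connection = [ ]
-- 	for i in idlist1:
-- 		temp1 = []
-- 		if has_n_in(i,links) > 1:
-- 			ls = has_n_in_link(i,links)
-- 			for j in ls:
-- 				for k in range(len(series_connection)):
-- 					if j[0] == series_connection[k][-1]:
-- 						temp1.append(k)
-- 		if len( temp1 ) > 0:
-- 			parallel_connection.append( [ temp1, i ] )
-- 	return parallel_connection;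
-- ===== SOURCE B (Python) =====
-- def generate_parallel_hierarchy(idlist1, series_connection, links):
--     '''
--     inputs: [ series connection list ] and [ links ]
--     output: [ [list of incoming series connection], component ]
--     '''
--     # index: target id -> list of source endpoints of its incoming links (link order)
--     incoming = {}
--     for l in links:
--         incoming.setdefault(int(l[2]), []).append(l[0])
--     # index: last element of a series connection -> list of its indices (ascending)
--     last_idx = {}
--     for k, sc in enumerate(series_connection):
--         last_idx.setdefault(sc[-1], []).append(k)
--     parallel_connection = []
--     for i in idlist1:
--         srcs = incoming.get(i, [])
--         if len(srcs) > 1: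
--             temp1 = [k for s in srcs for k in last_idx.get(s, [])]
--             if temp1:
--                 parallel_connection.append([temp1, i])
--     return parallel_connection
-- ===== Notes on version B (the rewrite author's own statement) =====
-- stated objective: alternative
-- what changed: B builds two dicts in one pass each (target id -> incoming link sources, series last element -> indices) and answers every id by lookup, replacing A's per-id rescans of links and the nested scan of series_connection; the output itself can dominate the cost, so this is measured ~2x, not asymptotically faster on the benchmark family.
-- outside the precondition, e.g. on generate_parallel_hierarchy([], [], [[1]]): A returns [], B raises IndexError; on generate_parallel_hierarchy([1], [[]], [[1, 2, 3]]): A returns [], B raises IndexError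
import Mathlib
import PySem

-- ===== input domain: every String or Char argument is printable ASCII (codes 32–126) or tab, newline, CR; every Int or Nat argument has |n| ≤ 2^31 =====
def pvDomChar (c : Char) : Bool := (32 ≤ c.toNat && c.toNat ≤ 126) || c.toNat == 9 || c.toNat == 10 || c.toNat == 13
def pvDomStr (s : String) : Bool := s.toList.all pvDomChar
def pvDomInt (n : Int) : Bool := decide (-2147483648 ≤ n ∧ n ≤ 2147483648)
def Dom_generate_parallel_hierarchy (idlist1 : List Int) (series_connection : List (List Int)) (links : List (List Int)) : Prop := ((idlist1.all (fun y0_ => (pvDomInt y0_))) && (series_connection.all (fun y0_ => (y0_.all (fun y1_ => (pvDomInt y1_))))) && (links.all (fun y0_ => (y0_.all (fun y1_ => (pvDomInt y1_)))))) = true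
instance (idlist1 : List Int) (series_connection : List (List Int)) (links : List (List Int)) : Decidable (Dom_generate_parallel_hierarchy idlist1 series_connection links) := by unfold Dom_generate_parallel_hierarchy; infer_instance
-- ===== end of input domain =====

-- B replaces A's per-id rescans of links and the nested scan of series_connection by two
-- dict indexes built once, then pure lookups (objective: alternative single-pass-indexing algorithm).

-- ===== PORT A =====
def has_n_in (id : Int) (links : List (List Int)) : Int :=
  links.foldl (fun linkin l => if PySem.List.pyGetD l 2 0 == id then linkin + 1 else linkin) 0

def has_n_in_link (id : Int) (links : List (List Int)) : List (List Int) :=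
  links.foldl (fun acc l => if PySem.List.pyGetD l 2 0 == id then acc ++ [l] else acc) []

def generate_parallel_hierarchy (idlist1 : List Int) (series_connection : List (List Int)) (links : List (List Int)) : List (List Int × Int) :=
  idlist1.foldl (fun parallel_connection i =>
    let temp1 : List Int :=
      if has_n_in i links > 1 then
        (has_n_in_link i links).foldl (fun t1 j =>
          (PySem.List.pyRange 0 (PySem.List.len series_connection) 1).foldl (fun t1 k =>
            if PySem.List.pyGetD j 0 0 == PySem.List.pyGetD (PySem.List.pyGetD series_connection k []) (-1) 0
            then t1 ++ [k] else t1) t1) []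
      else []
    if temp1.length > 0 then parallel_connection ++ [(temp1, i)] else parallel_connection) []

-- ===== PORT B =====
def generate_parallel_hierarchy_alt (idlist1 : List Int) (series_connection : List (List Int)) (links : List (List Int)) : List (List Int × Int) :=
  let incoming : PySem.Dict Int (List Int) :=
    links.foldl (fun d l => d.modify (PySem.List.pyGetD l 2 0) [] (fun v => v ++ [PySem.List.pyGetD l 0 0])) PySem.Dict.empty
  let last_idx : PySem.Dict Int (List Int) :=
    (PySem.List.enumerate series_connection 0).foldl (fun d p => d.modify (PySem.List.pyGetD p.2 (-1) 0) [] (fun v => v ++ [p.1])) PySem.Dict.empty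
  idlist1.foldl (fun out i =>
    let srcs := incoming.getD i []
    if srcs.length > 1 then
      let temp1 := srcs.flatMap (fun s => last_idx.getD s [])
      if temp1.length > 0 then out ++ [(temp1, i)] else out
    else out) []

-- ===== PRECONDITION & SPEC =====
-- Pre_ excludes exactly the inputs B's eager indexing passes would raise on: any link with
-- fewer than 3 entries or any empty series connection (A itself raises IndexError on those
-- whenever its lazy loops reach them; where it does not reach them it returns [] only by
-- accident of laziness — see claim.json cites).
def Pre_generate_parallel_hierarchy (idlist1 : List Int) (series_connection : List (List Int)) (links : List (List Int)) : Prop :=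
  (∀ l ∈ links, 3 ≤ l.length) ∧ (∀ sc ∈ series_connection, sc ≠ [])
instance (idlist1 : List Int) (series_connection : List (List Int)) (links : List (List Int)) : Decidable (Pre_generate_parallel_hierarchy idlist1 series_connection links) := by unfold Pre_generate_parallel_hierarchy; infer_instance

def pvWitness_generate_parallel_hierarchy : List Int × List (List Int) × List (List Int) :=
  ([3, 4], [[1, 2], [5, 2], [4]], [[2, 0, 3], [5, 0, 3], [4, 0, 7]])

def Spec_generate_parallel_hierarchy (idlist1 : List Int) (series_connection : List (List Int)) (links : List (List Int)) (out : List (List Int × Int)) : Prop := out = generate_parallel_hierarchy_alt idlist1 series_connection links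
instance (idlist1 : List Int) (series_connection : List (List Int)) (links : List (List Int)) (out : List (List Int × Int)) : Decidable (Spec_generate_parallel_hierarchy idlist1 series_connection links out) := by unfold Spec_generate_parallel_hierarchy; infer_instance

-- ===== CLAIM (what is proved, stated in full; the proofs are below) =====
def Claim_equal_generate_parallel_hierarchy : Prop := ∀ (idlist1 : List Int) (series_connection : List (List Int)) (links : List (List Int)), Dom_generate_parallel_hierarchy idlist1 series_connection links → Pre_generate_parallel_hierarchy idlist1 series_connection links → Spec_generate_parallel_hierarchy idlist1 series_connection links (generate_parallel_hierarchy idlist1 series_connection links)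

-- ===== LEMMAS AND PROOFS =====

-- B's first index, looked up at i, is exactly the sources of A's filtered link list.
theorem incoming_getD (links : List (List Int)) (i : Int) :
    (links.foldl (fun d l => d.modify (PySem.List.pyGetD l 2 0) [] (fun v => v ++ [PySem.List.pyGetD l 0 0])) PySem.Dict.empty).getD i []
      = (links.filter (fun l => PySem.List.pyGetD l 2 0 == i)).map (fun l => PySem.List.pyGetD l 0 0) := by
  have h := PySem.Dict.getD_foldl_modify_append
    (links.map (fun l => (PySem.List.pyGetD l 2 0, PySem.List.pyGetD l 0 0))) (PySem.Dict.empty) i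
  simpa [List.foldl_map, List.filter_map, Function.comp] using h

-- B's second index, looked up at s, is exactly the list of series indices whose last element is s.
theorem last_idx_getD (series_connection : List (List Int)) (s : Int) :
    ((PySem.List.enumerate series_connection 0).foldl (fun d p => d.modify (PySem.List.pyGetD p.2 (-1) 0) [] (fun v => v ++ [p.1])) PySem.Dict.empty).getD s []
      = (PySem.List.pyRange 0 (PySem.List.len series_connection) 1).filter
          (fun k => s == PySem.List.pyGetD (PySem.List.pyGetD series_connection k []) (-1) 0) := by
  have h := PySem.Dict.getD_foldl_modify_append
    ((PySem.List.enumerate series_connection 0).map (fun p => (PySem.List.pyGetD p.2 (-1) 0, p.1))) (PySem.Dict.empty) s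
  rw [PySem.List.enumerate_eq_map_pyRange series_connection []] at *
  simp only [List.foldl_map] at h ⊢
  rw [h]
  simp only [PySem.Dict.getD_empty, List.nil_append, List.filter_map, List.map_map,
    Function.comp_def, List.map_id']
  apply List.filter_congr
  intro k _
  simp [BEq.comm]

theorem has_n_in_eq (i : Int) (links : List (List Int)) :
    has_n_in i links = ((links.countP (fun l => PySem.List.pyGetD l 2 0 == i)) : Int) := by
  unfold has_n_in
  rw [PySem.List.foldl_if_add_one]
  simp

theorem has_n_in_link_eq (i : Int) (links : List (List Int)) :
    has_n_in_link i links = links.filter (fun l => PySem.List.pyGetD l 2 0 == i) := by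
  unfold has_n_in_link
  rw [PySem.List.foldl_append_if_eq_filter]
  simp

-- A's inner double loop over the filtered links equals B's flatMap of index lookups.
theorem temp1_eq (i : Int) (series_connection links : List (List Int)) :
    (has_n_in_link i links).foldl (fun t1 j =>
        (PySem.List.pyRange 0 (PySem.List.len series_connection) 1).foldl (fun t1 k =>
          if PySem.List.pyGetD j 0 0 == PySem.List.pyGetD (PySem.List.pyGetD series_connection k []) (-1) 0
          then t1 ++ [k] else t1) t1) []
    = ((links.filter (fun l => PySem.List.pyGetD l 2 0 == i)).map (fun l => PySem.List.pyGetD l 0 0)).flatMap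
        (fun s => (PySem.List.pyRange 0 (PySem.List.len series_connection) 1).filter
          (fun k => s == PySem.List.pyGetD (PySem.List.pyGetD series_connection k []) (-1) 0)) := by
  rw [has_n_in_link_eq]
  rw [PySem.List.foldl_congr_mem _ _
      (fun t1 j => t1 ++ (PySem.List.pyRange 0 (PySem.List.len series_connection) 1).filter
        (fun k => PySem.List.pyGetD j 0 0 == PySem.List.pyGetD (PySem.List.pyGetD series_connection k []) (-1) 0)) _
      (by intro acc x _; rw [PySem.List.foldl_append_if_eq_filter])]
  rw [PySem.List.foldl_append_eq_flatMap, List.flatMap_map]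
  simp

-- ===== VERDICT (by name: the statement is the Claim_ definition above) =====
theorem generate_parallel_hierarchy_spec : Claim_equal_generate_parallel_hierarchy := by
  intro idlist1 series_connection links _ _
  unfold Spec_generate_parallel_hierarchy generate_parallel_hierarchy generate_parallel_hierarchy_alt
  apply PySem.List.foldl_congr_mem
  intro acc i _
  simp only [incoming_getD, last_idx_getD, has_n_in_eq, temp1_eq, gt_iff_lt,
    List.length_map, Nat.one_lt_cast, List.countP_eq_length_filter]
  by_cases hc : 1 < (links.filter (fun l => PySem.List.pyGetD l 2 0 == i)).length
  · rw [if_pos hc, if_pos hc]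
  · rw [if_neg hc, if_neg hc]
    simp
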